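-- pv_equiv track=rewrite | github.com/Sami-Sh99/Project-Euler-Solutions | Problem118.py | CheckPartitions
-- ===== SOURCE A (Python) =====
-- perm=[1,2,3,4,5,6,7,8,9]
--
-- def CheckPartitions(startIndex, prev) :
--     count = 0
--     for  i in range(startIndex,len(perm)):
--         number = 0
--         for j in range(startIndex, i+1):
--             number = number * 10 + perm[j];
--
--         if(number < prev) : continue
--
--         if( not isPrime(number)) : continue
--
--         if(i == (len(perm)-1)): return count + 1
--
--         count += CheckPartitions(i + 1, number)
--     return count
--
-- def isPrime(n) :
-- 	if (n <= 1) :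
-- 		return False
-- 	if (n <= 3) :
-- 		return True
-- 	if (n % 2 == 0 or n % 3 == 0) :
-- 		return False
-- 	i = 5
-- 	while(i * i <= n) :
-- 		if (n % i == 0 or n % (i + 2) == 0) :
-- 			return False
-- 		i = i + 6
-- 	return True
-- ===== SOURCE B (Python) =====
-- perm=[1,2,3,4,5,6,7,8,9]
--
-- def isPrime(n) :
--     if (n <= 1) :
--         return False
--     if (n <= 3) :
--         return True
--     if (n % 2 == 0 or n % 3 == 0) :
--         return False
--     i = 5
--     while(i * i <= n) :
--         if (n % i == 0 or n % (i + 2) == 0) :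
--             return False
--         i = i + 6
--     return True
--
-- def _segmentations(xs):
--     # all ways to split xs into contiguous nonempty pieces (2^(len-1) of them)
--     if len(xs) == 1:
--         return [[[xs[0]]]]
--     out = []
--     for tail in _segmentations(xs[1:]):
--         out.append([[xs[0]]] + tail)          # start a new piece with xs[0]
--         out.append([[xs[0]] + tail[0]] + tail[1:])  # glue xs[0] onto the first piece
--     return out
--
-- def _valid(prev, vals):
--     w = prev
--     for v in vals:
--         if v < w or not isPrime(v):
--             return False
--         w = v
--     return True
--
-- def CheckPartitions(startIndex, prev):
--     n = len(perm)
--     if startIndex >= n: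
--         return 0
--     xs = [perm[j] for j in range(startIndex, n)]
--     count = 0
--     for segs in _segmentations(xs):
--         vals = []
--         for seg in segs:
--             v = 0
--             for d in seg:
--                 v = v * 10 + d
--             vals.append(v)
--         if _valid(prev, vals):
--             count += 1
--     return count
-- ===== Notes on version B (the rewrite author's own statement) =====
-- stated objective: alternative
-- what changed: A counts prime partitions by pruned recursive backtracking over the suffix; B materialises all 2^(k-1) segmentations of the suffix with a recursive generator and counts those whose segment values are all prime and non-decreasing starting from prev.
import Mathlib
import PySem

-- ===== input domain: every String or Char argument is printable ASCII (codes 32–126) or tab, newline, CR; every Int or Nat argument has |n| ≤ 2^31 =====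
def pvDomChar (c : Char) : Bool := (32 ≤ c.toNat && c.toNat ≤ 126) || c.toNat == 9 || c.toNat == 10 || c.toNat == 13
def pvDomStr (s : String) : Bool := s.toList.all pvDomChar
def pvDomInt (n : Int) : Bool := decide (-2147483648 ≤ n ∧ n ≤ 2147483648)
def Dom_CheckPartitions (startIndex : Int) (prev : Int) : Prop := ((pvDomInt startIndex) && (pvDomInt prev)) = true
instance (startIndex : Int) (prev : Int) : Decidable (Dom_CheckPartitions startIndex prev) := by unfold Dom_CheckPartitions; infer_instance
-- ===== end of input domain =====

-- B replaces A's pruned recursive backtracking by generate-and-filter: it materialises all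
-- 2^(k-1) segmentations of the suffix and counts the valid ones (objective: alternative).

-- ===== PORT A =====
def perm : List Int := [1, 2, 3, 4, 5, 6, 7, 8, 9]

-- shared module-level helper isPrime, used verbatim by both A and B (while-loop via sufficient fuel)
def isPrimeLoop : Nat → Int → Int → Bool
  | 0, _, _ => true
  | f + 1, i, n =>
    if i * i ≤ n then
      if PySem.Int.mod n i == 0 || PySem.Int.mod n (i + 2) == 0 then false
      else isPrimeLoop f (i + 6) n
    else true

def isPrime (n : Int) : Bool :=
  if n ≤ 1 then false
  else if n ≤ 3 then true
  else if PySem.Int.mod n 2 == 0 || PySem.Int.mod n 3 == 0 then false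
  else isPrimeLoop n.natAbs 5 n

mutual
-- A's recursion, with fuel (32 suffices on Pre_: recursion depth ≤ 19)
def cpA : Nat → Int → Int → Int
  | 0, _, _ => 0
  | f + 1, startIndex, prev =>
    cpALoop f startIndex prev (PySem.List.pyRange startIndex (perm.length : Int) 1) 0
termination_by f _ _ => (f, 0)

-- the 'for i in range(startIndex, len(perm))' loop of A, with early return at i = len-1
def cpALoop : Nat → Int → Int → List Int → Int → Int
  | _, _, _, [], count => count
  | f, startIndex, prev, i :: rest, count =>
    let number := (PySem.List.pyRange startIndex (i + 1) 1).foldl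
      (fun acc j => acc * 10 + PySem.List.pyGetD perm j 0) 0
    if number < prev then cpALoop f startIndex prev rest count
    else if !isPrime number then cpALoop f startIndex prev rest count
    else if i == (perm.length : Int) - 1 then count + 1
    else cpALoop f startIndex prev rest (count + cpA f (i + 1) number)
termination_by f _ _ l _ => (f, l.length + 1)
end

def CheckPartitions (startIndex : Int) (prev : Int) : Int := cpA 32 startIndex prev

-- ===== PORT B =====
-- all ways to split a nonempty list into contiguous nonempty pieces
def segmentations : List Int → List (List (List Int))
  | [] => []
  | [x] => [[[x]]]
  | x :: y :: rest =>
    (segmentations (y :: rest)).flatMap fun tail =>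
      [[x] :: tail, (x :: tail.headD []) :: tail.tail]

def dval (seg : List Int) : Int := seg.foldl (fun v d => v * 10 + d) 0

def validSeg : Int → List Int → Bool
  | _, [] => true
  | w, v :: vs => if v < w || !isPrime v then false else validSeg v vs

def CheckPartitions_alt (startIndex : Int) (prev : Int) : Int :=
  if startIndex ≥ (perm.length : Int) then 0
  else
    let xs := (PySem.List.pyRange startIndex (perm.length : Int) 1).map
      (fun j => PySem.List.pyGetD perm j 0)
    (segmentations xs).foldl
      (fun count segs => if validSeg prev (segs.map dval) then count + 1 else count) 0

-- ===== PRECONDITION & SPEC =====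
-- Pre_ excludes exactly startIndex ≤ -10, where A raises IndexError (perm[startIndex] is out of range).
def Pre_CheckPartitions (startIndex : Int) (prev : Int) : Prop := -9 ≤ startIndex
instance (startIndex : Int) (prev : Int) : Decidable (Pre_CheckPartitions startIndex prev) := by
  unfold Pre_CheckPartitions; infer_instance

def pvWitness_CheckPartitions : Int × Int := (0, 0)

def Spec_CheckPartitions (startIndex : Int) (prev : Int) (out : Int) : Prop := out = CheckPartitions_alt startIndex prev
instance (startIndex : Int) (prev : Int) (out : Int) : Decidable (Spec_CheckPartitions startIndex prev out) := by unfold Spec_CheckPartitions; infer_instance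

-- ===== CLAIM (what is proved, stated in full; the proofs are below) =====
def Claim_equal_CheckPartitions : Prop := ∀ (startIndex : Int) (prev : Int), Dom_CheckPartitions startIndex prev → Pre_CheckPartitions startIndex prev → Spec_CheckPartitions startIndex prev (CheckPartitions startIndex prev)

-- ===== LEMMAS AND PROOFS =====

-- digit read by both ports at index j
def dig (j : Int) : Int := PySem.List.pyGetD perm j 0

-- B's count as a countP
def V (xs : List Int) (p : Int) : Int :=
  ((segmentations xs).countP (fun σ => validSeg p (σ.map dval)) : Nat)

-- the sum A's loop computes: remaining digits, digits already in the open first piece, prev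
def loopSum : List Int → List Int → Int → Int
  | [], _, _ => 0
  | [x], d, p =>
    if dval (d ++ [x]) < p || !isPrime (dval (d ++ [x])) then 0 else 1
  | x :: y :: rest, d, p =>
    (if dval (d ++ [x]) < p || !isPrime (dval (d ++ [x])) then 0
     else V (y :: rest) (dval (d ++ [x])))
    + loopSum (y :: rest) (d ++ [x]) p

theorem segmentations_ne_nil (xs : List Int) (σ : List (List Int))
    (h : σ ∈ segmentations xs) : σ ≠ [] := by
  induction xs using segmentations.induct generalizing σ with
  | case1 => simp [segmentations] at h
  | case2 x => simp [segmentations] at h; simp [h]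
  | case3 x y rest ih =>
    simp [segmentations] at h
    obtain ⟨tail, _, hc⟩ := h
    rcases hc with h1 | h1 <;> simp [h1]

theorem foldl_count_eq_countP (q : List (List Int) → Bool) (l : List (List (List Int))) (c : Int) :
    l.foldl (fun count segs => if q segs then count + 1 else count) c
      = c + ((l.countP q : Nat) : Int) := by
  induction l generalizing c with
  | nil => simp
  | cons a l ih =>
    simp only [List.foldl_cons, List.countP_cons, ih]
    by_cases h : q a <;> simp [h] <;> push_cast <;> ring

theorem countP_flatMap_two {α β : Type} (l : List α) (u w : α → β) (P : β → Bool) :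
    (l.flatMap fun a => [u a, w a]).countP P
      = l.countP (fun a => P (u a)) + l.countP (fun a => P (w a)) := by
  induction l with
  | nil => simp
  | cons a l ih =>
    simp only [List.flatMap_cons, List.countP_append, List.countP_cons, List.countP_nil, ih]
    by_cases h1 : P (u a) <;> by_cases h2 : P (w a) <;> simp [h1, h2] <;> omega

theorem genRec (xs : List Int) : ∀ (d : List Int) (p : Int), xs ≠ [] →
    (((segmentations xs).countP
        (fun σ => validSeg p (((d ++ σ.headD []) :: σ.tail).map dval)) : Nat) : Int)
      = loopSum xs d p := by
  induction xs using segmentations.induct with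
  | case1 => intro _ _ hne; exact absurd rfl hne
  | case2 x =>
    intro d p _
    simp only [segmentations, loopSum, List.countP_cons, List.countP_nil, List.headD_cons,
      List.tail_cons, List.append_nil, List.map_cons, List.map_nil]
    by_cases h : dval (d ++ [x]) < p || !isPrime (dval (d ++ [x])) <;> simp [validSeg, h]
  | case3 x y rest ih =>
    intro d p _
    rw [show segmentations (x :: y :: rest)
        = (segmentations (y :: rest)).flatMap
            (fun tail => [[x] :: tail, (x :: tail.headD []) :: tail.tail]) from rfl]
    rw [countP_flatMap_two]
    push_cast
    have h2 : (((segmentations (y :: rest)).countP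
        (fun tail => validSeg p (((d ++ ((x :: tail.headD []) :: tail.tail).headD [])
            :: ((x :: tail.headD []) :: tail.tail).tail).map dval)) : Nat) : Int)
        = loopSum (y :: rest) (d ++ [x]) p := by
      have ih' := ih (d ++ [x]) p (by simp)
      simp only [List.headD_cons, List.tail_cons, List.append_assoc, List.singleton_append] at ih' ⊢
      exact ih'
    rw [h2]
    have h1 : (((segmentations (y :: rest)).countP
        (fun tail => validSeg p (((d ++ (([x] : List Int) :: tail).headD [])
            :: (([x] : List Int) :: tail).tail).map dval)) : Nat) : Int)
        = (if dval (d ++ [x]) < p || !isPrime (dval (d ++ [x])) then 0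
           else V (y :: rest) (dval (d ++ [x]))) := by
      by_cases hc : dval (d ++ [x]) < p || !isPrime (dval (d ++ [x]))
      · rw [if_pos hc]
        have : (segmentations (y :: rest)).countP
            (fun tail => validSeg p (((d ++ (([x] : List Int) :: tail).headD [])
              :: (([x] : List Int) :: tail).tail).map dval)) = 0 := by
          rw [List.countP_eq_zero]
          intro tail _
          simp [validSeg, hc]
        rw [this]; rfl
      · rw [if_neg hc]
        unfold V
        congr 1
        apply List.countP_congr
        intro tail _
        simp [validSeg, hc]
    rw [h1]
    rfl

theorem alt_eq_V (s p : Int) (h : s < 9) :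
    CheckPartitions_alt s p
      = V ((PySem.List.pyRange s 9 1).map dig) p := by
  unfold CheckPartitions_alt
  rw [if_neg (by simp [perm]; omega)]
  rw [show ((perm.length : Nat) : Int) = 9 from rfl]
  rw [foldl_count_eq_countP]
  simp only [zero_add]
  rfl

theorem cpALoop_eq (f : Nat) (s p : Int)
    (IH : ∀ s' p', (9 - s').toNat < f → cpA f s' p' = CheckPartitions_alt s' p')
    (hfs : (9 - s).toNat ≤ f) :
    ∀ (m : Nat) (i₀ c : Int), (9 - i₀).toNat = m → s ≤ i₀ →
    cpALoop f s p (PySem.List.pyRange i₀ 9 1) c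
      = c + loopSum ((PySem.List.pyRange i₀ 9 1).map dig)
                    ((PySem.List.pyRange s i₀ 1).map dig) p := by
  intro m
  induction m with
  | zero =>
    intro i₀ c hm _
    rw [PySem.List.pyRange_one_eq_nil (by omega)]
    simp [cpALoop, loopSum]
  | succ m ihm =>
    intro i₀ c hm hsle
    have hlt : i₀ < 9 := by omega
    rw [PySem.List.pyRange_one_cons hlt]
    have hnum : (PySem.List.pyRange s (i₀ + 1) 1).foldl
        (fun acc j => acc * 10 + PySem.List.pyGetD perm j 0) 0
        = dval (((PySem.List.pyRange s i₀ 1).map dig) ++ [dig i₀]) := by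
      rw [show ((PySem.List.pyRange s i₀ 1).map dig) ++ [dig i₀]
          = ((PySem.List.pyRange s i₀ 1) ++ [i₀]).map dig by simp]
      rw [← PySem.List.pyRange_one_succ_right hsle]
      unfold dval dig
      rw [List.foldl_map]
    set d : List Int := (PySem.List.pyRange s i₀ 1).map dig with hd
    set v : Int := dval (d ++ [dig i₀]) with hv
    by_cases h8 : i₀ = 8
    · subst h8
      rw [show PySem.List.pyRange (8 + 1) 9 1 = [] from PySem.List.pyRange_one_eq_nil (by omega)]
      simp only [cpALoop, hnum, List.map_cons, List.map_nil]
      have hls : loopSum [dig 8] d p = if v < p || !isPrime v then 0 else 1 := by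
        simp only [loopSum, ← hv]
      rw [hls]
      by_cases h1 : v < p
      · rw [if_pos h1]
        simp [cpALoop, h1]
      · rw [if_neg h1]
        by_cases h2 : isPrime v
        · rw [if_neg (by simp [h2])]
          rw [if_pos (by rfl)]
          simp [h1, h2]
        · rw [if_pos (by simp [h2])]
          simp [cpALoop, h1, h2]
    · -- i₀ < 8
      have h9 : i₀ + 1 < 9 := by omega
      have hcons := PySem.List.pyRange_one_cons h9
      have hmap : (PySem.List.pyRange (i₀ + 1) 9 1).map dig
          = dig (i₀ + 1) :: (PySem.List.pyRange (i₀ + 1 + 1) 9 1).map dig := by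
        rw [hcons]; simp
      have hnext : ((PySem.List.pyRange s (i₀ + 1) 1).map dig) = d ++ [dig i₀] := by
        rw [PySem.List.pyRange_one_succ_right hsle, List.map_append]; simp [hd]
      have hloopSum : loopSum (dig i₀ :: (PySem.List.pyRange (i₀ + 1) 9 1).map dig) d p
          = (if v < p || !isPrime v then 0
             else V ((PySem.List.pyRange (i₀ + 1) 9 1).map dig) v)
            + loopSum ((PySem.List.pyRange (i₀ + 1) 9 1).map dig) (d ++ [dig i₀]) p := by
        rw [hmap]
        simp only [loopSum, ← hv]
      simp only [cpALoop, hnum, ← hd, ← hv, List.map_cons]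
      rw [hloopSum]
      have hrec := fun c => ihm (i₀ + 1) c (by omega) (by omega)
      by_cases h1 : v < p
      · rw [if_pos h1]
        rw [hrec c, hnext]
        simp [h1]
      · rw [if_neg h1]
        by_cases h2 : isPrime v
        · rw [if_neg (by simp [h2])]
          rw [if_neg (by simp [perm]; omega)]
          rw [hrec (c + cpA f (i₀ + 1) v), hnext]
          rw [IH (i₀ + 1) v (by omega)]
          rw [alt_eq_V (i₀ + 1) v (by omega)]
          simp [h1, h2]
          ring
        · rw [if_pos (by simp [h2])]
          rw [hrec c, hnext]
          simp [h1, h2]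

theorem cpA_eq (f : Nat) : ∀ (s p : Int), (9 - s).toNat < f →
    cpA f s p = CheckPartitions_alt s p := by
  induction f with
  | zero => intro s p hf; omega
  | succ f ihf =>
    intro s p hf
    rw [show cpA (f + 1) s p
        = cpALoop f s p (PySem.List.pyRange s (perm.length : Int) 1) 0 from by rw [cpA]]
    rw [show ((perm.length : Nat) : Int) = 9 from rfl]
    by_cases hs : 9 ≤ s
    · rw [PySem.List.pyRange_one_eq_nil hs]
      rw [show cpALoop f s p [] 0 = 0 from by rw [cpALoop]]
      unfold CheckPartitions_alt
      rw [if_pos (by simp [perm]; omega)]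
    · have hs' : s < 9 := by omega
      rw [cpALoop_eq f s p ihf (by omega) (9 - s).toNat s 0 rfl le_rfl]
      rw [show PySem.List.pyRange s s 1 = [] from PySem.List.pyRange_one_eq_nil le_rfl]
      simp only [List.map_nil, zero_add]
      rw [alt_eq_V s p hs']
      have hne : ((PySem.List.pyRange s 9 1).map dig) ≠ [] := by
        rw [PySem.List.pyRange_one_cons hs']; simp
      rw [← genRec ((PySem.List.pyRange s 9 1).map dig) [] p hne]
      unfold V
      congr 1
      apply List.countP_congr
      intro σ hσ
      obtain ⟨h0, t, rfl⟩ := List.exists_cons_of_ne_nil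
        (segmentations_ne_nil _ σ hσ)
      simp

-- ===== VERDICT (by name: the statement is the Claim_ definition above) =====
theorem CheckPartitions_spec : Claim_equal_CheckPartitions := by
  intro s p _ hpre
  unfold Spec_CheckPartitions CheckPartitions
  exact cpA_eq 32 s p (by unfold Pre_CheckPartitions at hpre; omega)
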